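-- pv_equiv track=rewrite | github.com/BobbyBand/Bit-flip-Attack-BFA- | DeepRecon_Simulation/simulate_deeprecon_vgg_pytorch.py | denoise
-- ===== SOURCE A (Python) =====
-- from typing import List, Dict, Tuple
--
-- def denoise(records: List[Tuple[int,str,int,int]],
--             latency_hit_threshold: int = 180,
--             per_func_debounce_ns: int = 1_200_000,
--             plausible_ops = ("Conv2D","FC","ReLU","MaxPool","Softmax","BiasAdd")) -> List[Tuple[int,str]]:
--     # recompute hit via latency
--     rows = []
--     for ts, f, lat, is_hit in records:
--         hit = is_hit or (lat < latency_hit_threshold)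
--         if hit:
--             rows.append((ts, f))
--     # per-function debounce
--     rows.sort(key=lambda x: (x[1], x[0]))
--     kept = []
--     last_t = {}
--     for ts, f in rows:
--         lt = last_t.get(f, -10**18)
--         if ts - lt >= per_func_debounce_ns:
--             kept.append((ts,f))
--             last_t[f] = ts
--     kept.sort(key=lambda x: x[0])
--     # plausibility filter for VGG
--     kept = [r for r in kept if r[1] in plausible_ops]
--     return kept
-- ===== SOURCE B (Python) =====
-- def _next_index(a, x, lo):
--     # leftmost index j >= lo with a[j] >= x (len(a) if none); a[lo:] must be sorted
--     hi = len(a)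
--     while lo < hi:
--         mid = (lo + hi) // 2
--         if a[mid] < x:
--             lo = mid + 1
--         else:
--             hi = mid
--     return lo
--
-- def denoise(records,
--             latency_hit_threshold=180,
--             per_func_debounce_ns=1_200_000,
--             plausible_ops=("Conv2D","FC","ReLU","MaxPool","Softmax","BiasAdd")):
--     # group hit timestamps per function
--     groups = {}
--     for ts, f, lat, is_hit in records:
--         if is_hit or lat < latency_hit_threshold:
--             groups.setdefault(f, []).append(ts)
--     out = []
--     # stateless debounce: keep the head, then jump by binary search to the
--     # first timestamp out of the debounce window and slice the rest away
--     for f in sorted(groups):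
--         a = sorted(groups[f])
--         while a:
--             t = a[0]
--             out.append((t, f))
--             a = a[_next_index(a, t + per_func_debounce_ns, 1):]
--     out.sort(key=lambda x: x[0])
--     return [r for r in out if r[1] in plausible_ops]
-- ===== Notes on version B (the rewrite author's own statement) =====
-- stated objective: alternative
-- what changed: B replaces A's global (function,timestamp) sort plus stateful last-seen-dict debounce pass (a gap test on every row) by grouping hit timestamps per function and emitting kept timestamps statelessly: keep the head, binary-search the leftmost timestamp outside the debounce window, slice there and repeat.
import Mathlib
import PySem

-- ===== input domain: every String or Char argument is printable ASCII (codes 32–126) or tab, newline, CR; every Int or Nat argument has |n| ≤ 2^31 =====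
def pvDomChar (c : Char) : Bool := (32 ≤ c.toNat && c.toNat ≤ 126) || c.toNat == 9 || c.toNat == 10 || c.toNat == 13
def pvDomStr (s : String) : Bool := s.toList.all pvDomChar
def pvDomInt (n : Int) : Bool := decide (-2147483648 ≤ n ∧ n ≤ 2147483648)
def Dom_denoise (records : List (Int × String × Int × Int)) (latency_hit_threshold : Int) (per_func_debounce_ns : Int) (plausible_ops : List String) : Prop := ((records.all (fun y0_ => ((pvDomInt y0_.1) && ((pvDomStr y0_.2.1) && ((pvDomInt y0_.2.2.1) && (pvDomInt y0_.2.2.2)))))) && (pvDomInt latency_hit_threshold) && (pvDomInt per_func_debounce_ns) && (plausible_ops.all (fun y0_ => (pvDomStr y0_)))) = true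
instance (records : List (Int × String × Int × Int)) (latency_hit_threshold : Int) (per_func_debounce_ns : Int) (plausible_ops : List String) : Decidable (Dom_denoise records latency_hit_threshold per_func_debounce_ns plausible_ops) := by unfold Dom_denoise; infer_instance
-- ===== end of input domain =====

-- B groups hit timestamps per function and debounces each group STATELESSLY: keep the head,
-- binary-search the leftmost timestamp outside the debounce window and slice there, instead of
-- A's global (f,ts) sort with a last-seen dict and a gap test on every row; same result, proved below.

-- ===== PORT A =====
def denoise (records : List (Int × String × Int × Int)) (latency_hit_threshold : Int) (per_func_debounce_ns : Int) (plausible_ops : List String) : List (Int × String) :=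
  -- rows = [(ts, f) for hits]; hit = is_hit or lat < threshold (is_hit truthy ⇔ ≠ 0)
  let rows := records.foldl (fun rows r =>
    if r.2.2.2 ≠ 0 ∨ r.2.2.1 < latency_hit_threshold then rows ++ [(r.1, r.2.1)] else rows) []
  -- rows.sort(key=lambda x: (x[1], x[0]))
  let rows := PySem.List.sorted2 rows (fun x => x.2) (fun x => x.1)
  -- debounce pass with last_t dict (default -10**18)
  let st := rows.foldl (fun (st : List (Int × String) × PySem.Dict String Int) x =>
    if x.1 - st.2.getD x.2 (-(10 ^ 18)) ≥ per_func_debounce_ns then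
      (st.1 ++ [(x.1, x.2)], st.2.insert x.2 x.1)
    else st) ([], PySem.Dict.empty)
  -- kept.sort(key=lambda x: x[0]); plausibility filter
  (PySem.List.sorted st.1 (fun x => x.1)).filter (fun r => plausible_ops.contains r.2)

-- ===== PORT B =====
-- _next_index(a, x, lo): hand-written binary search of Source B (hi = len(a); loop on lo < hi).
-- The extra fuel argument only makes the loop structurally total: hi - lo shrinks each turn,
-- so fuel = hi - lo never runs out and the branch structure is exactly Source B's.
def pvNextIndexGo (a : List Int) (x : Int) : Nat → Nat → Nat → Nat
  | 0, lo, _ => lo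
  | fuel + 1, lo, hi =>
    if lo < hi then
      let mid := (lo + hi) / 2
      if a.getD mid 0 < x then pvNextIndexGo a x fuel (mid + 1) hi else pvNextIndexGo a x fuel lo mid
    else lo

def pvNextIndex (a : List Int) (x : Int) (lo hi : Nat) : Nat :=
  pvNextIndexGo a x (hi - lo) lo hi

-- Source B's per-function while loop: keep a[0], slice at _next_index(a, t+d, 1), repeat.
-- Fuel = list length is again only a structural totality guard: the slice drops ≥ 1 element.
def pvJumpGo (d : Int) (f : String) : Nat → List Int → List (Int × String)
  | 0, _ => []
  | _, [] => []
  | fuel + 1, t :: rest =>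
    (t, f) :: pvJumpGo d f fuel ((t :: rest).drop (pvNextIndex (t :: rest) (t + d) 1 (t :: rest).length))

def pvJump (d : Int) (f : String) (a : List Int) : List (Int × String) :=
  pvJumpGo d f a.length a

def denoise_alt (records : List (Int × String × Int × Int)) (latency_hit_threshold : Int) (per_func_debounce_ns : Int) (plausible_ops : List String) : List (Int × String) :=
  -- groups.setdefault(f, []).append(ts) for hits
  let groups := records.foldl (fun (g : PySem.Dict String (List Int)) r =>
    if r.2.2.2 ≠ 0 ∨ r.2.2.1 < latency_hit_threshold then g.modify r.2.1 [] (· ++ [r.1]) else g)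
    PySem.Dict.empty
  -- for f in sorted(groups): stateless jump-debounce of sorted(groups[f])
  let out := (PySem.List.sorted groups.keys (fun f => f)).foldl (fun out f =>
    out ++ pvJump per_func_debounce_ns f (PySem.List.sorted (groups.getD f []) (fun t => t))) []
  -- out.sort(key=lambda x: x[0]); plausibility filter
  (PySem.List.sorted out (fun x => x.1)).filter (fun r => plausible_ops.contains r.2)

-- ===== PRECONDITION & SPEC =====
def Spec_denoise (records : List (Int × String × Int × Int)) (latency_hit_threshold : Int) (per_func_debounce_ns : Int) (plausible_ops : List String) (out : List (Int × String)) : Prop := out = denoise_alt records latency_hit_threshold per_func_debounce_ns plausible_ops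
instance (records : List (Int × String × Int × Int)) (latency_hit_threshold : Int) (per_func_debounce_ns : Int) (plausible_ops : List String) (out : List (Int × String)) : Decidable (Spec_denoise records latency_hit_threshold per_func_debounce_ns plausible_ops out) := by unfold Spec_denoise; infer_instance

-- ===== CLAIM (what is proved, stated in full; the proofs are below) =====
def Claim_equal_denoise : Prop := ∀ (records : List (Int × String × Int × Int)) (latency_hit_threshold : Int) (per_func_debounce_ns : Int) (plausible_ops : List String), Dom_denoise records latency_hit_threshold per_func_debounce_ns plausible_ops → Spec_denoise records latency_hit_threshold per_func_debounce_ns plausible_ops (denoise records latency_hit_threshold per_func_debounce_ns plausible_ops)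

-- ===== LEMMAS AND PROOFS =====

-- A's debounce step (state: kept list + last-seen dict)
def pvStepA (d : Int) (st : List (Int × String) × PySem.Dict String Int) (x : Int × String) : List (Int × String) × PySem.Dict String Int :=
  if x.1 - st.2.getD x.2 (-(10 ^ 18)) ≥ d then (st.1 ++ [(x.1, x.2)], st.2.insert x.2 x.1) else st

-- intermediate per-function linear debounce step (state: kept list + Option last)
def pvStepB (d : Int) (f : String) (st : List (Int × String) × Option Int) (ts : Int) : List (Int × String) × Option Int :=
  match st.2 with
  | none => (st.1 ++ [(ts, f)], some ts)
  | some l => if ts - l ≥ d then (st.1 ++ [(ts, f)], some ts) else st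

-- the lexicographic sort key of A's first sort
def pvKey (x : Int × String) : Lex (String × Int) := toLex (x.2, x.1)

-- sorted2 with keys (snd, fst) is sorted with the lexicographic key
theorem pv_sorted2_eq_sorted_lex (xs : List (Int × String)) :
    PySem.List.sorted2 xs (fun x => x.2) (fun x => x.1) = PySem.List.sorted xs pvKey := by
  have hb : (fun (a b : Int × String) => decide ((fun x : Int × String => x.2) a < (fun x : Int × String => x.2) b) || (!decide ((fun x : Int × String => x.2) b < (fun x : Int × String => x.2) a) && decide ((fun x : Int × String => x.1) a < (fun x : Int × String => x.1) b)))
      = fun a b => decide (pvKey a < pvKey b) := by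
    funext a b
    rcases lt_trichotomy a.2 b.2 with h|h|h
    · simp [pvKey, Prod.Lex.lt_iff, h, not_lt.mpr h.le]
    · simp [pvKey, Prod.Lex.lt_iff, h]
    · simp [pvKey, Prod.Lex.lt_iff, h, not_lt.mpr h.le, h.ne']
  unfold PySem.List.sorted2 PySem.List.sorted
  simp only [Bool.false_eq_true, if_false, hb]

-- partitioning a list by its key values (filters over a Nodup cover) is a permutation
theorem pv_flatMap_filter_perm {α κ : Type} [BEq κ] [LawfulBEq κ] (key : α → κ) :
    ∀ (ks : List κ) (l : List α), ks.Nodup → (∀ x ∈ l, key x ∈ ks) →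
      (ks.flatMap fun k => l.filter (fun x => key x == k)).Perm l := by
  intro ks
  induction ks with
  | nil =>
    intro l _ h
    have : l = [] := List.eq_nil_iff_forall_not_mem.mpr (fun x hx => by simpa using h x hx)
    simp [this]
  | cons k ks ih =>
    intro l hnd h
    have hk : k ∉ ks := (List.nodup_cons.mp hnd).1
    have hnd' : ks.Nodup := (List.nodup_cons.mp hnd).2
    set l' := l.filter (fun x => !(key x == k)) with hl'
    have hcongr : ∀ k' ∈ ks, l.filter (fun x => key x == k') = l'.filter (fun x => key x == k') := by
      intro k' hk'
      rw [hl', List.filter_filter]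
      apply List.filter_congr
      intro x _
      by_cases hx : key x == k'
      · have : ¬ (key x == k) = true := by
          simp only [beq_iff_eq] at hx ⊢
          rw [hx]; intro hekk; exact hk (hekk ▸ hk')
        simp [hx, this]
      · simp [hx]
    have hfm : (ks.flatMap fun k' => l.filter (fun x => key x == k')) =
        (ks.flatMap fun k' => l'.filter (fun x => key x == k')) := List.flatMap_congr hcongr
    have hih : (ks.flatMap fun k' => l'.filter (fun x => key x == k')).Perm l' := by
      apply ih _ hnd'
      intro x hx
      have hxl : x ∈ l := (List.mem_filter.mp hx).1
      have hxk : ¬ (key x == k) = true := by simpa using (List.mem_filter.mp hx).2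
      have := h x hxl
      simp only [List.mem_cons] at this
      rcases this with h1 | h1
      · exact absurd (by simp [h1]) hxk
      · exact h1
    simp only [List.flatMap_cons, hfm]
    exact ((hih.append_left _).trans (List.filter_append_perm _ l))

-- flatMap over strictly increasing function names, each chunk snd-constant and fst-sorted,
-- is pairwise ≤ in the lexicographic key
theorem pv_pairwise_flatMap (ks : List String) (g : String → List (Int × String))
    (hks : ks.Pairwise (· < ·))
    (hsnd : ∀ k, ∀ x ∈ g k, x.2 = k)
    (hfst : ∀ k, (g k).Pairwise (fun a b => a.1 ≤ b.1)) :
    (ks.flatMap g).Pairwise (fun a b => pvKey a ≤ pvKey b) := by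
  induction ks with
  | nil => simp
  | cons k ks ih =>
    obtain ⟨hklt, hks'⟩ := List.pairwise_cons.mp hks
    simp only [List.flatMap_cons, List.pairwise_append]
    refine ⟨?_, ih hks', ?_⟩
    · refine (hfst k).imp_of_mem ?_
      intro a b ha hb hab
      have h2a := hsnd k a ha
      have h2b := hsnd k b hb
      simp [pvKey, Prod.Lex.le_iff, h2a, h2b, hab]
    · intro a ha b hb
      obtain ⟨k', hk', hbk'⟩ := List.mem_flatMap.mp hb
      have h2a := hsnd k a ha
      have h2b := hsnd k' b hbk'
      have : k < k' := hklt k' hk'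
      simp [pvKey, Prod.Lex.le_iff, h2a, h2b, this]

-- A's global (f,ts)-sort decomposes into sorted function groups
theorem pv_sort_decomp (rows : List (Int × String)) :
    PySem.List.sorted2 rows (fun x => x.2) (fun x => x.1) =
      (PySem.List.sorted (PySem.Set.ofList (rows.map (fun x => x.2))) (fun f => f)).flatMap
        (fun f => PySem.List.sorted (rows.filter (fun x => x.2 == f)) (fun x => x.1)) := by
  rw [pv_sorted2_eq_sorted_lex]
  set ks := PySem.List.sorted (PySem.Set.ofList (rows.map (fun x => x.2))) (fun f => f) with hks
  have hksnd : ks.Nodup :=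
    (PySem.List.sorted_perm _ _ _).nodup_iff.mpr (PySem.Set.nodup_ofList _)
  have hinj : Function.Injective pvKey := by
    intro a b h
    simp only [pvKey] at h
    have := toLex.injective h
    exact Prod.ext (congrArg Prod.snd this) (congrArg Prod.fst this)
  apply PySem.List.eq_of_perm_of_pairwise_le_of_injective pvKey hinj
  · refine (PySem.List.sorted_perm _ _ _).trans (List.Perm.symm ?_)
    refine (List.Perm.flatMap_left (l := ks) ?_).trans (pv_flatMap_filter_perm (fun x : Int × String => x.2) ks rows hksnd ?_)
    · intro f _
      exact PySem.List.sorted_perm _ _ _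
    · intro x hx
      rw [hks, PySem.List.mem_sorted, PySem.Set.mem_ofList]
      exact List.mem_map_of_mem hx
  · exact PySem.List.sorted_pairwise _ _
  · apply pv_pairwise_flatMap ks _ ?_ ?_ ?_
    · exact PySem.List.sorted_ofList_pairwise_lt _
    · intro k x hx
      have := (List.mem_filter.mp ((PySem.List.mem_sorted _ _ _ _).mp hx)).2
      simpa using this
    · intro k
      exact PySem.List.sorted_pairwise _ _

-- sorting the fst-projections equals projecting the fst-sorted pairs
theorem pv_sorted_map_fst (c : List (Int × String)) :
    PySem.List.sorted (c.map (fun x => x.1)) (fun t => t) =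
      (PySem.List.sorted c (fun x => x.1)).map (fun x => x.1) := by
  apply List.Perm.eq_of_pairwise (le := fun a b : Int => a ≤ b)
  · intro a b _ _ h1 h2; exact le_antisymm h1 h2
  · exact PySem.List.sorted_pairwise _ _
  · exact List.pairwise_map.mpr (PySem.List.sorted_pairwise c (fun x => x.1))
  · exact (PySem.List.sorted_perm _ _ _).trans (((PySem.List.sorted_perm c _ _).map _).symm)

-- A's debounce over one snd-constant chunk = linear Option-state debounce over the timestamps
theorem pv_chunk_fold (d : Int) (f : String) :
    ∀ (c : List (Int × String)) (kept : List (Int × String)) (ltd : PySem.Dict String Int),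
      (∀ x ∈ c, x.2 = f) → (∀ x ∈ c, d ≤ x.1 + 10 ^ 18) →
      (c.foldl (pvStepA d) (kept, ltd)).1 =
        ((c.map (fun x => x.1)).foldl (pvStepB d f) (kept, ltd.get? f)).1 ∧
      ∀ k, k ≠ f → (c.foldl (pvStepA d) (kept, ltd)).2.get? k = ltd.get? k := by
  intro c
  induction c with
  | nil => intro kept ltd _ _; exact ⟨rfl, fun _ _ => rfl⟩
  | cons x c ih =>
    intro kept ltd hsnd hbnd
    have hx2 : x.2 = f := hsnd x (List.mem_cons_self ..)
    have hpow : (10:Int) ^ 18 = 1000000000000000000 := by norm_num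
    have hb := hbnd x (List.mem_cons_self ..)
    simp only [List.foldl_cons, List.map_cons]
    cases ho : ltd.get? f with
    | none =>
      have hcond : x.1 - ltd.getD f (-(10 ^ 18)) ≥ d := by
        rw [PySem.Dict.getD_eq_get?_getD, ho]
        simp only [Option.getD_none]
        omega
      have hA : pvStepA d (kept, ltd) x = (kept ++ [(x.1, f)], ltd.insert f x.1) := by
        simp only [pvStepA, hx2]
        rw [if_pos hcond]
      have hB : pvStepB d f (kept, none) x.1 = (kept ++ [(x.1, f)], some x.1) := rfl
      rw [hA, hB]
      obtain ⟨h1, h2⟩ := ih (kept ++ [(x.1, f)]) (ltd.insert f x.1)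
        (fun y hy => hsnd y (List.mem_cons_of_mem _ hy))
        (fun y hy => hbnd y (List.mem_cons_of_mem _ hy))
      refine ⟨by rw [h1, PySem.Dict.get?_insert_self], ?_⟩
      intro k hk
      rw [h2 k hk, PySem.Dict.get?_insert_of_ne _ _ hk]
    | some l =>
      by_cases hge : x.1 - l ≥ d
      · have hcond : x.1 - ltd.getD f (-(10 ^ 18)) ≥ d := by
          rw [PySem.Dict.getD_eq_get?_getD, ho]; simpa using hge
        have hA : pvStepA d (kept, ltd) x = (kept ++ [(x.1, f)], ltd.insert f x.1) := by
          simp only [pvStepA, hx2]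
          rw [if_pos hcond]
        have hB : pvStepB d f (kept, some l) x.1 = (kept ++ [(x.1, f)], some x.1) := by
          simp only [pvStepB, if_pos hge]
        rw [hA, hB]
        obtain ⟨h1, h2⟩ := ih (kept ++ [(x.1, f)]) (ltd.insert f x.1)
          (fun y hy => hsnd y (List.mem_cons_of_mem _ hy))
          (fun y hy => hbnd y (List.mem_cons_of_mem _ hy))
        refine ⟨by rw [h1, PySem.Dict.get?_insert_self], ?_⟩
        intro k hk
        rw [h2 k hk, PySem.Dict.get?_insert_of_ne _ _ hk]
      · have hcond : ¬ (x.1 - ltd.getD f (-(10 ^ 18)) ≥ d) := by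
          rw [PySem.Dict.getD_eq_get?_getD, ho]; simpa using hge
        have hA : pvStepA d (kept, ltd) x = (kept, ltd) := by
          simp only [pvStepA, hx2]
          rw [if_neg hcond]
        have hB : pvStepB d f (kept, some l) x.1 = (kept, some l) := by
          simp only [pvStepB, if_neg hge]
        rw [hA, hB]
        obtain ⟨h1, h2⟩ := ih kept ltd
          (fun y hy => hsnd y (List.mem_cons_of_mem _ hy))
          (fun y hy => hbnd y (List.mem_cons_of_mem _ hy))
        exact ⟨by rw [h1, ho], h2⟩

-- A's debounce over the concatenation of per-function chunks = per-function linear debounces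
theorem pv_chunks_fold (d : Int) (chunk : String → List (Int × String))
    (hsnd : ∀ f, ∀ x ∈ chunk f, x.2 = f) (hbnd : ∀ f, ∀ x ∈ chunk f, d ≤ x.1 + 10 ^ 18) :
    ∀ (ks : List String) (kept : List (Int × String)) (ltd : PySem.Dict String Int),
      ks.Nodup → (∀ f ∈ ks, ltd.get? f = none) →
      ((ks.flatMap chunk).foldl (pvStepA d) (kept, ltd)).1 =
        ks.foldl (fun acc f => (((chunk f).map (fun x => x.1)).foldl (pvStepB d f) (acc, none)).1) kept := by
  intro ks
  induction ks with
  | nil => intro kept ltd _ _; rfl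
  | cons f ks ih =>
    intro kept ltd hnd h0
    simp only [List.flatMap_cons, List.foldl_append, List.foldl_cons]
    obtain ⟨h1, h2⟩ := pv_chunk_fold d f (chunk f) kept ltd (hsnd f) (hbnd f)
    have hnf : f ∉ ks := (List.nodup_cons.mp hnd).1
    have hrw : ((chunk f).foldl (pvStepA d) (kept, ltd)) =
        (((chunk f).foldl (pvStepA d) (kept, ltd)).1, ((chunk f).foldl (pvStepA d) (kept, ltd)).2) := rfl
    rw [hrw, ih _ _ (List.nodup_cons.mp hnd).2 (fun f' hf' => by
      rw [h2 f' (fun he => hnf (he ▸ hf')), h0 f' (List.mem_cons_of_mem _ hf')])]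
    rw [h1, h0 f (List.mem_cons_self ..)]

-- the binary search never returns below lo
theorem pvNextIndexGo_ge (a : List Int) (x : Int) :
    ∀ fuel lo hi, lo ≤ pvNextIndexGo a x fuel lo hi := by
  intro fuel
  induction fuel with
  | zero => intro lo hi; exact Nat.le_refl lo
  | succ m ih =>
    intro lo hi
    simp only [pvNextIndexGo]
    split_ifs with h1 h2
    · exact le_trans (by omega) (ih ((lo + hi) / 2 + 1) hi)
    · exact ih lo ((lo + hi) / 2)
    · exact Nat.le_refl lo

-- Source B's binary search really finds the leftmost index ≥ lo whose element is ≥ x (sorted list)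
theorem pvNextIndexGo_spec (a : List Int) (x : Int) (ha : a.Pairwise (· ≤ ·)) :
    ∀ fuel lo hi, hi - lo ≤ fuel → hi ≤ a.length → lo ≤ hi →
      pvNextIndexGo a x fuel lo hi ≤ hi ∧
      (∀ j (hj : j < a.length), lo ≤ j → j < pvNextIndexGo a x fuel lo hi → a[j] < x) ∧
      (∀ j (hj : j < a.length), pvNextIndexGo a x fuel lo hi ≤ j → j < hi → x ≤ a[j]) := by
  have hmono := List.pairwise_iff_getElem.mp ha
  intro fuel
  induction fuel with
  | zero =>
    intro lo hi hf hhi hlohi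
    have : lo = hi := by omega
    subst this
    exact ⟨Nat.le_refl _, fun j hj h1 h2 => by simp [pvNextIndexGo] at h2; omega,
      fun j hj h1 h2 => by simp [pvNextIndexGo] at h1; omega⟩
  | succ m ih =>
    intro lo hi hf hhi hlohi
    by_cases h : lo < hi
    · have hred : pvNextIndexGo a x (m + 1) lo hi =
          (if a.getD ((lo + hi) / 2) 0 < x then pvNextIndexGo a x m ((lo + hi) / 2 + 1) hi
           else pvNextIndexGo a x m lo ((lo + hi) / 2)) := by
        simp [pvNextIndexGo, h]
      set mid := (lo + hi) / 2 with hm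
      have hmid1 : lo ≤ mid := by omega
      have hmid2 : mid < hi := by omega
      have hmlen : mid < a.length := by omega
      rw [List.getD_eq_getElem a 0 hmlen] at hred
      by_cases hlt : a[mid] < x
      · rw [hred, if_pos hlt]
        obtain ⟨i1, i2, i3⟩ := ih (mid + 1) hi (by omega) (by omega) (by omega)
        refine ⟨i1, ?_, i3⟩
        intro j hj hlo hjlt
        by_cases hjm : j ≤ mid
        · rcases Nat.lt_or_ge j mid with hc | hc
          · exact lt_of_le_of_lt (hmono j mid hj hmlen hc) hlt
          · have : j = mid := by omega
            subst this; exact hlt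
        · exact i2 j hj (by omega) hjlt
      · rw [hred, if_neg hlt]
        rw [not_lt] at hlt
        obtain ⟨i1, i2, i3⟩ := ih lo mid (by omega) (by omega) (by omega)
        refine ⟨by omega, i2, ?_⟩
        intro j hj h1 h2
        by_cases hjm : j < mid
        · exact i3 j hj h1 hjm
        · rcases Nat.lt_or_ge mid j with hc | hc
          · exact le_trans hlt (hmono mid j hmlen hj hc)
          · have : j = mid := by omega
            subst this; exact hlt
    · have : lo = hi := by omega
      subst this
      have hred : pvNextIndexGo a x (m + 1) lo lo = lo := by simp [pvNextIndexGo]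
      rw [hred]
      exact ⟨Nat.le_refl _, fun j hj h1 h2 => by omega, fun j hj h1 h2 => by omega⟩

theorem pvNextIndex_ge (a : List Int) (x : Int) (lo hi : Nat) : lo ≤ pvNextIndex a x lo hi :=
  pvNextIndexGo_ge a x (hi - lo) lo hi

theorem pvNextIndex_spec (a : List Int) (x : Int) (ha : a.Pairwise (· ≤ ·))
    (lo hi : Nat) (hhi : hi ≤ a.length) (hlohi : lo ≤ hi) :
    pvNextIndex a x lo hi ≤ hi ∧
    (∀ j (hj : j < a.length), lo ≤ j → j < pvNextIndex a x lo hi → a[j] < x) ∧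
    (∀ j (hj : j < a.length), pvNextIndex a x lo hi ≤ j → j < hi → x ≤ a[j]) :=
  pvNextIndexGo_spec a x ha (hi - lo) lo hi (Nat.le_refl _) hhi hlohi

-- dropWhile computed from an index characterization
theorem pv_dropWhile_eq_drop {α : Type} (p : α → Bool) :
    ∀ (l : List α) (n : Nat), n ≤ l.length →
      (∀ j (hj : j < l.length), j < n → p l[j]) →
      (∀ h : n < l.length, ¬ p l[n]) →
      l.dropWhile p = l.drop n := by
  intro l
  induction l with
  | nil =>
    intro n h _ _
    have : n = 0 := by simpa using h
    subst this; rfl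
  | cons x t ih =>
    intro n hn h1 h2
    cases n with
    | zero =>
      have := h2 (by simp)
      simp only [List.getElem_cons_zero] at this
      simp [this]
    | succ m =>
      have hx : p x := h1 0 (by simp) (by omega)
      rw [List.dropWhile_cons, if_pos hx, List.drop_succ_cons]
      exact ih m (by simpa using hn)
        (fun j hj hjm => by simpa using h1 (j + 1) (by simpa using hj) (by omega))
        (fun h => by simpa using h2 (by simpa using h))

-- linear debounce with a remembered last kept t skips exactly the window [t, t+d)
theorem pv_stepB_some (d : Int) (f : String) :
    ∀ (rest : List Int) (kept : List (Int × String)) (t : Int),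
      (rest.foldl (pvStepB d f) (kept, some t)).1 =
        ((rest.dropWhile (fun x => decide (x < t + d))).foldl (pvStepB d f) (kept, none)).1 := by
  intro rest
  induction rest with
  | nil => intro kept t; rfl
  | cons x tail ih =>
    intro kept t
    by_cases hx : x < t + d
    · have : pvStepB d f (kept, some t) x = (kept, some t) := by
        simp only [pvStepB]; rw [if_neg (by omega)]
      rw [List.foldl_cons, this, List.dropWhile_cons, if_pos (by simpa using hx)]
      exact ih kept t
    · have hA : pvStepB d f (kept, some t) x = (kept ++ [(x, f)], some x) := by
        simp only [pvStepB]; rw [if_pos (by omega)]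
      rw [List.foldl_cons, hA, List.dropWhile_cons, if_neg (by simpa using hx),
        List.foldl_cons]
      rfl

-- linear Option-state debounce of a sorted timestamp list = Source B's binary-search jump loop
theorem pv_jumpGo_eq (d : Int) (f : String) :
    ∀ (n : Nat) (a : List Int), a.length ≤ n → a.Pairwise (· ≤ ·) → ∀ kept,
      (a.foldl (pvStepB d f) (kept, none)).1 = kept ++ pvJumpGo d f n a := by
  intro n
  induction n with
  | zero =>
    intro a ha _ kept
    have : a = [] := List.eq_nil_of_length_eq_zero (by omega)
    subst this
    simp [pvJumpGo]
  | succ m ih =>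
    intro a ha hpw kept
    cases a with
    | nil => simp [pvJumpGo]
    | cons t rest =>
      have hjeq : pvJumpGo d f (m + 1) (t :: rest) =
          (t, f) :: pvJumpGo d f m ((t :: rest).drop (pvNextIndex (t :: rest) (t + d) 1 (t :: rest).length)) := rfl
      have hk1 : 1 ≤ pvNextIndex (t :: rest) (t + d) 1 (t :: rest).length :=
        pvNextIndex_ge _ _ _ _
      obtain ⟨s1, s2, s3⟩ := pvNextIndex_spec (t :: rest) (t + d) hpw 1 (t :: rest).length
        (le_refl _) (by simp)
      generalize hgen : pvNextIndex (t :: rest) (t + d) 1 (t :: rest).length = k at hjeq hk1 s1 s2 s3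
      obtain ⟨c, rfl⟩ : ∃ c, k = c + 1 := ⟨k - 1, by omega⟩
      have hlenc : (t :: rest).length = rest.length + 1 := rfl
      -- rest.dropWhile (< t + d) = rest.drop c
      have hdw : rest.dropWhile (fun x => decide (x < t + d)) = rest.drop c := by
        apply pv_dropWhile_eq_drop _ rest c (by omega)
        · intro j hj hjc
          have := s2 (j + 1) (by omega) (by omega) (by omega)
          simpa using this
        · intro hcl
          have h3 := s3 (c + 1) (by omega) (le_refl _) (by omega)
          simp only [List.getElem_cons_succ] at h3
          simp only [decide_eq_true_eq]
          omega
      have hdrop : (t :: rest).drop (c + 1) = rest.drop c := by simp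
      rw [hdrop] at hjeq
      have hstep0 : pvStepB d f (kept, none) t = (kept ++ [(t, f)], some t) := rfl
      rw [List.foldl_cons, hstep0, pv_stepB_some, hdw, hjeq]
      have hlen : (rest.drop c).length ≤ m := by
        rw [List.length_drop]
        simp only [List.length_cons] at ha
        omega
      rw [ih _ hlen ((List.pairwise_cons.mp hpw).2.drop) (kept ++ [(t, f)])]
      simp

theorem pv_jump_eq (d : Int) (f : String) (a : List Int) (hpw : a.Pairwise (· ≤ ·))
    (kept : List (Int × String)) :
    (a.foldl (pvStepB d f) (kept, none)).1 = kept ++ pvJump d f a :=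
  pv_jumpGo_eq d f a.length a (le_refl _) hpw kept

-- ===== VERDICT (by name: the statement is the Claim_ definition above) =====
theorem denoise_spec : Claim_equal_denoise := by
  intro records thr d ops hDom
  simp only [Dom_denoise, Bool.and_eq_true, List.all_eq_true, pvDomInt, decide_eq_true_eq] at hDom
  obtain ⟨⟨⟨hrec, -⟩, hd⟩, -⟩ := hDom
  show denoise records thr d ops = denoise_alt records thr d ops
  unfold denoise denoise_alt
  simp only [PySem.List.foldl_ite_eq_foldl_filter,
    PySem.List.foldl_append_singleton_eq_map, List.nil_append]
  set filt := records.filter (fun r => decide (r.2.2.2 ≠ 0 ∨ r.2.2.1 < thr)) with hfilt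
  set rows := filt.map (fun r => (r.1, r.2.1)) with hrows
  -- B's grouping dict, characterized
  have hgroups : (filt.foldl (fun g r => g.modify r.2.1 [] (fun x => x ++ [r.1])) PySem.Dict.empty)
      = ((filt.map (fun r => (r.2.1, r.1))).foldl (fun d p => d.modify p.1 [] (fun x => x ++ [p.2])) PySem.Dict.empty) := by
    rw [List.foldl_map]
  have hkeys : (filt.foldl (fun g r => g.modify r.2.1 [] (fun x => x ++ [r.1])) PySem.Dict.empty).keys
      = PySem.Set.ofList (rows.map (fun x => x.2)) := by
    rw [PySem.Dict.keys_foldl_modify_key filt (fun r => r.2.1) [] (fun _ r => (fun x => x ++ [r.1])) PySem.Dict.empty]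
    simp [hrows, List.map_map, PySem.Set.update, PySem.Set.ofList_eq_foldl, Function.comp_def]
  have hgetD : ∀ f, (filt.foldl (fun g r => g.modify r.2.1 [] (fun x => x ++ [r.1])) PySem.Dict.empty).getD f []
      = (rows.filter (fun x => x.2 == f)).map (fun x => x.1) := by
    intro f
    rw [hgroups, PySem.Dict.getD_foldl_modify_append (filt.map (fun r => (r.2.1, r.1))) PySem.Dict.empty f]
    simp [hrows, List.filter_map, List.map_map, Function.comp_def]
  simp only [hkeys, hgetD, pv_sorted_map_fst]
  rw [pv_sort_decomp rows]
  have hstepA : (fun (st : List (Int × String) × PySem.Dict String Int) (x : Int × String) =>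
      if x.1 - st.2.getD x.2 (-(10 ^ 18)) ≥ d then (st.1 ++ [(x.1, x.2)], st.2.insert x.2 x.1) else st) = pvStepA d := rfl
  simp only [hstepA]
  set ks := PySem.List.sorted (PySem.Set.ofList (rows.map (fun x => x.2))) (fun f => f) with hks
  set chunk := fun f => PySem.List.sorted (rows.filter (fun x => x.2 == f)) (fun x => x.1) with hchunk
  have hsnd : ∀ f, ∀ x ∈ chunk f, x.2 = f := by
    intro f x hx
    have := (List.mem_filter.mp ((PySem.List.mem_sorted _ _ _ _).mp hx)).2
    simpa using this
  have hbnd : ∀ f, ∀ x ∈ chunk f, d ≤ x.1 + 10 ^ 18 := by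
    intro f x hx
    have hxrows : x ∈ rows := (List.mem_filter.mp ((PySem.List.mem_sorted _ _ _ _).mp hx)).1
    obtain ⟨r, hr, hrx⟩ := List.mem_map.mp hxrows
    have hrrec : r ∈ records := (List.mem_filter.mp hr).1
    have h1 := (hrec r hrrec).1
    have hx1 : x.1 = r.1 := by rw [← hrx]
    have hpow : (10:Int) ^ 18 = 1000000000000000000 := by norm_num
    omega
  have hnodup : ks.Nodup :=
    (PySem.List.sorted_perm _ _ _).nodup_iff.mpr (PySem.Set.nodup_ofList _)
  have h0 : ∀ f ∈ ks, (PySem.Dict.empty : PySem.Dict String Int).get? f = none := by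
    intro f _
    simp [PySem.Dict.get?_empty]
  rw [pv_chunks_fold d chunk hsnd hbnd ks [] PySem.Dict.empty hnodup h0]
  -- replace each per-function linear debounce by Source B's binary-search jump loop
  have hfold : (fun (acc : List (Int × String)) f => (((chunk f).map (fun x => x.1)).foldl (pvStepB d f) (acc, none)).1)
      = (fun acc f => acc ++ pvJump d f ((chunk f).map (fun x => x.1))) := by
    funext acc f
    exact pv_jump_eq d f _ (List.pairwise_map.mpr (PySem.List.sorted_pairwise _ _)) acc
  rw [hfold]
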